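-- pv_equiv track=rewrite | github.com/MachinesWithThoughts/lazyups | src/lazyups/app.py | grouped_field_sections
-- ===== SOURCE A (Python) =====
-- def grouped_field_sections(fields: list[str]) -> list[tuple[str, list[str]]]:
--     groups: dict[str, list[str]] = {
--         "Device": [],
--         "Battery": [],
--         "Input": [],
--         "UPS": [],
--         "Output": [],
--         "Other": [],
--     }
--     for field in fields:
--         if field == "model" or field.startswith("device."):
--             groups["Device"].append(field)
--         elif field.startswith("battery."):
--             groups["Battery"].append(field)
--         elif field.startswith("input."):
--             groups["Input"].append(field)
--         elif field.startswith("ups."):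
--             groups["UPS"].append(field)
--         elif field.startswith("output."):
--             groups["Output"].append(field)
--         else:
--             groups["Other"].append(field)
--
--     grouped: list[tuple[str, list[str]]] = []
--     for name in ("Device", "Battery", "Input", "UPS", "Output", "Other"):
--         section_fields = sorted(set(groups[name]))
--         if section_fields:
--             grouped.append((name, section_fields))
--     return grouped
-- ===== SOURCE B (Python) =====
-- def grouped_field_sections(fields: list[str]) -> list[tuple[str, list[str]]]:
--     def is_device(f): return f == "model" or f.startswith("device.")
--     def is_battery(f): return f.startswith("battery.")
--     def is_input(f): return f.startswith("input.")
--     def is_ups(f): return f.startswith("ups.")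
--     def is_output(f): return f.startswith("output.")
--     def is_other(f):
--         return not (is_device(f) or is_battery(f) or is_input(f)
--                     or is_ups(f) or is_output(f))
--
--     sections = [
--         ("Device", is_device),
--         ("Battery", is_battery),
--         ("Input", is_input),
--         ("UPS", is_ups),
--         ("Output", is_output),
--         ("Other", is_other),
--     ]
--     out: list[tuple[str, list[str]]] = []
--     for name, pred in sections:
--         members = sorted({f for f in fields if pred(f)})
--         if members:
--             out.append((name, members))
--     return out
-- ===== Notes on version B (the rewrite author's own statement) =====
-- stated objective: alternative
-- what changed: Replaces the single dispatching pass into a dict of buckets by six independent per-section filter scans of the input list (each section's members selected by its own predicate, the catch-all by the negation of the known prefixes), trading one pass for simpler stateless scans.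
import Mathlib
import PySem

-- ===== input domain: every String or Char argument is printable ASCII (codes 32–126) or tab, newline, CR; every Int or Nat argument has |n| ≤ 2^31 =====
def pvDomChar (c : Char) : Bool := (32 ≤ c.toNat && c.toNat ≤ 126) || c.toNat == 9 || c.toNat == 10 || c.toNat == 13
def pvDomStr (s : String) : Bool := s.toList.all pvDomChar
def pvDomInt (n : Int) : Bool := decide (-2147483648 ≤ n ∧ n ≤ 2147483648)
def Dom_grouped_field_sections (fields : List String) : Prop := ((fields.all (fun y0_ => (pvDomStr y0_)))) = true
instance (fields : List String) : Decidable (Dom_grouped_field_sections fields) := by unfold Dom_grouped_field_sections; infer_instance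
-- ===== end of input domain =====

-- B replaces A's single bucketing pass into a dict by six independent per-section
-- filter scans in the fixed section order (objective: alternative decomposition, not speed).

-- ===== PORT A =====
-- one loop iteration of A: dispatch `field` into the bucket dict
def gfsStep (d : PySem.Dict String (List String)) (field : String) :
    PySem.Dict String (List String) :=
  if field == "model" || PySem.Str.startswith field "device." then
    d.modify "Device" [] (fun l => l ++ [field])
  else if PySem.Str.startswith field "battery." then
    d.modify "Battery" [] (fun l => l ++ [field])
  else if PySem.Str.startswith field "input." then
    d.modify "Input" [] (fun l => l ++ [field])
  else if PySem.Str.startswith field "ups." then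
    d.modify "UPS" [] (fun l => l ++ [field])
  else if PySem.Str.startswith field "output." then
    d.modify "Output" [] (fun l => l ++ [field])
  else
    d.modify "Other" [] (fun l => l ++ [field])

def grouped_field_sections (fields : List String) : List (String × List String) :=
  let groups0 : PySem.Dict String (List String) :=
    PySem.Dict.ofList
      [("Device", []), ("Battery", []), ("Input", []), ("UPS", []), ("Output", []), ("Other", [])]
  let groups := fields.foldl gfsStep groups0
  (["Device", "Battery", "Input", "UPS", "Output", "Other"] : List String).foldl
    (fun grouped name =>
      let section_fields :=
        PySem.List.sorted (PySem.Set.ofList (groups.getD name [])) (fun x => x) false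
      if section_fields = [] then grouped else grouped ++ [(name, section_fields)])
    []

-- ===== PORT B =====
def isDeviceField (f : String) : Bool := f == "model" || PySem.Str.startswith f "device."
def isBatteryField (f : String) : Bool := PySem.Str.startswith f "battery."
def isInputField (f : String) : Bool := PySem.Str.startswith f "input."
def isUpsField (f : String) : Bool := PySem.Str.startswith f "ups."
def isOutputField (f : String) : Bool := PySem.Str.startswith f "output."
def isOtherField (f : String) : Bool :=
  !(isDeviceField f || isBatteryField f || isInputField f || isUpsField f || isOutputField f)

def grouped_field_sections_alt (fields : List String) : List (String × List String) :=
  ([("Device", isDeviceField), ("Battery", isBatteryField), ("Input", isInputField),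
    ("UPS", isUpsField), ("Output", isOutputField), ("Other", isOtherField)] :
      List (String × (String → Bool))).foldl
    (fun out sec =>
      let members :=
        PySem.List.sorted (PySem.Set.ofList (fields.filter sec.2)) (fun x => x) false
      if members = [] then out else out ++ [(sec.1, members)])
    []

-- ===== PRECONDITION & SPEC =====
def Spec_grouped_field_sections (fields : List String) (out : List (String × List String)) : Prop := out = grouped_field_sections_alt fields
instance (fields : List String) (out : List (String × List String)) : Decidable (Spec_grouped_field_sections fields out) := by unfold Spec_grouped_field_sections; infer_instance

-- ===== CLAIM (what is proved, stated in full; the proofs are below) =====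
def Claim_equal_grouped_field_sections : Prop := ∀ (fields : List String), Dom_grouped_field_sections fields → Spec_grouped_field_sections fields (grouped_field_sections fields)

-- ===== LEMMAS AND PROOFS =====

-- two prefixes with different first characters cannot both be prefixes of the same list
lemma pref_disj {c c' : Char} {p p' : List Char} (hne : c ≠ c') (xs : List Char)
    (h : PySem.Chars.startswith xs (c :: p) = true) :
    PySem.Chars.startswith xs (c' :: p') = false := by
  cases xs with
  | nil => simp [PySem.Chars.startswith, List.isPrefixOf] at h
  | cons a t =>
    simp only [PySem.Chars.startswith, List.isPrefixOf, Bool.and_eq_true, beq_iff_eq] at h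
    simp only [PySem.Chars.startswith, List.isPrefixOf, Bool.and_eq_false_iff]
    left; simp only [beq_eq_false_iff_ne, ne_eq]
    intro hca; exact hne (h.1.trans hca.symm)

-- the same, lifted to String prefixes with distinct head characters
lemma str_sw_disj (field : String) (pre pre' : String) (c c' : Char) (p p' : List Char)
    (hpre : pre.toList = c :: p) (hpre' : pre'.toList = c' :: p') (hne : c ≠ c')
    (h : PySem.Str.startswith field pre = true) :
    PySem.Str.startswith field pre' = false := by
  simp only [PySem.Str.startswith, hpre, hpre'] at h ⊢
  exact pref_disj hne _ h

-- a field in A's Device branch starts with no other section prefix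
lemma str_sw_disj_dev (field : String) (pre : String) (c : Char) (p : List Char)
    (hpre : pre.toList = c :: p) (hne : c ≠ 'd')
    (hm : PySem.Str.startswith "model" pre = false)
    (h1 : (field == "model" || PySem.Str.startswith field "device.") = true) :
    PySem.Str.startswith field pre = false := by
  simp only [Bool.or_eq_true, beq_iff_eq] at h1
  rcases h1 with rfl | h1
  · exact hm
  · have h1' : PySem.Chars.startswith field.toList ('d' :: "evice.".toList) = true := by
      simpa only [PySem.Str.startswith,
        (by decide : ("device." : String).toList = 'd' :: "evice.".toList)] using h1
    simp only [PySem.Str.startswith, hpre]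
    exact pref_disj (Ne.symm hne) _ h1'

-- A's whole loop, seen from a fixed bucket `name` with B's predicate `p` for it
lemma gfsStep_getD (name : String) (p : String → Bool)
    (hstep : ∀ d field, (gfsStep d field).getD name [] =
      d.getD name [] ++ (if p field then [field] else []))
    (fields : List String) (d : PySem.Dict String (List String)) :
    (fields.foldl gfsStep d).getD name [] = d.getD name [] ++ fields.filter p := by
  induction fields generalizing d with
  | nil => simp
  | cons f rest ih =>
    simp only [List.foldl_cons, ih, hstep, List.filter_cons]
    by_cases hp : p f = true <;> simp [hp]

lemma gfsStep_device (d : PySem.Dict String (List String)) (field : String) :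
    (gfsStep d field).getD "Device" [] =
      d.getD "Device" [] ++ (if isDeviceField field then [field] else []) := by
  unfold gfsStep
  by_cases h1 : (field == "model" || PySem.Str.startswith field "device.") = true
  · rw [if_pos h1, PySem.Dict.getD_modify, if_pos rfl, (show isDeviceField field = true from h1)]; simp
  rw [if_neg h1]
  by_cases h2 : PySem.Str.startswith field "battery." = true
  · rw [if_pos h2, PySem.Dict.getD_modify, if_neg (by decide),
      (show isDeviceField field = false from Bool.eq_false_iff.mpr h1)]
    simp
  rw [if_neg h2]
  by_cases h3 : PySem.Str.startswith field "input." = true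
  · rw [if_pos h3, PySem.Dict.getD_modify, if_neg (by decide),
      (show isDeviceField field = false from Bool.eq_false_iff.mpr h1)]
    simp
  rw [if_neg h3]
  by_cases h4 : PySem.Str.startswith field "ups." = true
  · rw [if_pos h4, PySem.Dict.getD_modify, if_neg (by decide),
      (show isDeviceField field = false from Bool.eq_false_iff.mpr h1)]
    simp
  rw [if_neg h4]
  by_cases h5 : PySem.Str.startswith field "output." = true
  · rw [if_pos h5, PySem.Dict.getD_modify, if_neg (by decide),
      (show isDeviceField field = false from Bool.eq_false_iff.mpr h1)]
    simp
  rw [if_neg h5]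
  rw [PySem.Dict.getD_modify, if_neg (by decide), (show isDeviceField field = false from Bool.eq_false_iff.mpr h1)]
  simp

lemma gfsStep_battery (d : PySem.Dict String (List String)) (field : String) :
    (gfsStep d field).getD "Battery" [] =
      d.getD "Battery" [] ++ (if isBatteryField field then [field] else []) := by
  unfold gfsStep
  by_cases h1 : (field == "model" || PySem.Str.startswith field "device.") = true
  · rw [if_pos h1, PySem.Dict.getD_modify, if_neg (by decide),
      (show isBatteryField field = false from str_sw_disj_dev field "battery." 'b' "attery.".toList (by decide) (by decide) (by decide) h1)]
    simp
  rw [if_neg h1]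
  by_cases h2 : PySem.Str.startswith field "battery." = true
  · rw [if_pos h2, PySem.Dict.getD_modify, if_pos rfl, (show isBatteryField field = true from h2)]; simp
  rw [if_neg h2]
  by_cases h3 : PySem.Str.startswith field "input." = true
  · rw [if_pos h3, PySem.Dict.getD_modify, if_neg (by decide),
      (show isBatteryField field = false from Bool.eq_false_iff.mpr h2)]
    simp
  rw [if_neg h3]
  by_cases h4 : PySem.Str.startswith field "ups." = true
  · rw [if_pos h4, PySem.Dict.getD_modify, if_neg (by decide),
      (show isBatteryField field = false from Bool.eq_false_iff.mpr h2)]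
    simp
  rw [if_neg h4]
  by_cases h5 : PySem.Str.startswith field "output." = true
  · rw [if_pos h5, PySem.Dict.getD_modify, if_neg (by decide),
      (show isBatteryField field = false from Bool.eq_false_iff.mpr h2)]
    simp
  rw [if_neg h5]
  rw [PySem.Dict.getD_modify, if_neg (by decide), (show isBatteryField field = false from Bool.eq_false_iff.mpr h2)]
  simp

lemma gfsStep_input (d : PySem.Dict String (List String)) (field : String) :
    (gfsStep d field).getD "Input" [] =
      d.getD "Input" [] ++ (if isInputField field then [field] else []) := by
  unfold gfsStep
  by_cases h1 : (field == "model" || PySem.Str.startswith field "device.") = true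
  · rw [if_pos h1, PySem.Dict.getD_modify, if_neg (by decide),
      (show isInputField field = false from str_sw_disj_dev field "input." 'i' "nput.".toList (by decide) (by decide) (by decide) h1)]
    simp
  rw [if_neg h1]
  by_cases h2 : PySem.Str.startswith field "battery." = true
  · rw [if_pos h2, PySem.Dict.getD_modify, if_neg (by decide),
      (show isInputField field = false from str_sw_disj field "battery." "input." 'b' 'i' "attery.".toList "nput.".toList (by decide) (by decide) (by decide) h2)]
    simp
  rw [if_neg h2]
  by_cases h3 : PySem.Str.startswith field "input." = true
  · rw [if_pos h3, PySem.Dict.getD_modify, if_pos rfl, (show isInputField field = true from h3)]; simp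
  rw [if_neg h3]
  by_cases h4 : PySem.Str.startswith field "ups." = true
  · rw [if_pos h4, PySem.Dict.getD_modify, if_neg (by decide),
      (show isInputField field = false from Bool.eq_false_iff.mpr h3)]
    simp
  rw [if_neg h4]
  by_cases h5 : PySem.Str.startswith field "output." = true
  · rw [if_pos h5, PySem.Dict.getD_modify, if_neg (by decide),
      (show isInputField field = false from Bool.eq_false_iff.mpr h3)]
    simp
  rw [if_neg h5]
  rw [PySem.Dict.getD_modify, if_neg (by decide), (show isInputField field = false from Bool.eq_false_iff.mpr h3)]
  simp

lemma gfsStep_ups (d : PySem.Dict String (List String)) (field : String) :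
    (gfsStep d field).getD "UPS" [] =
      d.getD "UPS" [] ++ (if isUpsField field then [field] else []) := by
  unfold gfsStep
  by_cases h1 : (field == "model" || PySem.Str.startswith field "device.") = true
  · rw [if_pos h1, PySem.Dict.getD_modify, if_neg (by decide),
      (show isUpsField field = false from str_sw_disj_dev field "ups." 'u' "ps.".toList (by decide) (by decide) (by decide) h1)]
    simp
  rw [if_neg h1]
  by_cases h2 : PySem.Str.startswith field "battery." = true
  · rw [if_pos h2, PySem.Dict.getD_modify, if_neg (by decide),
      (show isUpsField field = false from str_sw_disj field "battery." "ups." 'b' 'u' "attery.".toList "ps.".toList (by decide) (by decide) (by decide) h2)]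
    simp
  rw [if_neg h2]
  by_cases h3 : PySem.Str.startswith field "input." = true
  · rw [if_pos h3, PySem.Dict.getD_modify, if_neg (by decide),
      (show isUpsField field = false from str_sw_disj field "input." "ups." 'i' 'u' "nput.".toList "ps.".toList (by decide) (by decide) (by decide) h3)]
    simp
  rw [if_neg h3]
  by_cases h4 : PySem.Str.startswith field "ups." = true
  · rw [if_pos h4, PySem.Dict.getD_modify, if_pos rfl, (show isUpsField field = true from h4)]; simp
  rw [if_neg h4]
  by_cases h5 : PySem.Str.startswith field "output." = true
  · rw [if_pos h5, PySem.Dict.getD_modify, if_neg (by decide),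
      (show isUpsField field = false from Bool.eq_false_iff.mpr h4)]
    simp
  rw [if_neg h5]
  rw [PySem.Dict.getD_modify, if_neg (by decide), (show isUpsField field = false from Bool.eq_false_iff.mpr h4)]
  simp

lemma gfsStep_output (d : PySem.Dict String (List String)) (field : String) :
    (gfsStep d field).getD "Output" [] =
      d.getD "Output" [] ++ (if isOutputField field then [field] else []) := by
  unfold gfsStep
  by_cases h1 : (field == "model" || PySem.Str.startswith field "device.") = true
  · rw [if_pos h1, PySem.Dict.getD_modify, if_neg (by decide),
      (show isOutputField field = false from str_sw_disj_dev field "output." 'o' "utput.".toList (by decide) (by decide) (by decide) h1)]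
    simp
  rw [if_neg h1]
  by_cases h2 : PySem.Str.startswith field "battery." = true
  · rw [if_pos h2, PySem.Dict.getD_modify, if_neg (by decide),
      (show isOutputField field = false from str_sw_disj field "battery." "output." 'b' 'o' "attery.".toList "utput.".toList (by decide) (by decide) (by decide) h2)]
    simp
  rw [if_neg h2]
  by_cases h3 : PySem.Str.startswith field "input." = true
  · rw [if_pos h3, PySem.Dict.getD_modify, if_neg (by decide),
      (show isOutputField field = false from str_sw_disj field "input." "output." 'i' 'o' "nput.".toList "utput.".toList (by decide) (by decide) (by decide) h3)]
    simp
  rw [if_neg h3]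
  by_cases h4 : PySem.Str.startswith field "ups." = true
  · rw [if_pos h4, PySem.Dict.getD_modify, if_neg (by decide),
      (show isOutputField field = false from str_sw_disj field "ups." "output." 'u' 'o' "ps.".toList "utput.".toList (by decide) (by decide) (by decide) h4)]
    simp
  rw [if_neg h4]
  by_cases h5 : PySem.Str.startswith field "output." = true
  · rw [if_pos h5, PySem.Dict.getD_modify, if_pos rfl, (show isOutputField field = true from h5)]; simp
  rw [if_neg h5]
  rw [PySem.Dict.getD_modify, if_neg (by decide), (show isOutputField field = false from Bool.eq_false_iff.mpr h5)]
  simp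

lemma gfsStep_other (d : PySem.Dict String (List String)) (field : String) :
    (gfsStep d field).getD "Other" [] =
      d.getD "Other" [] ++ (if isOtherField field then [field] else []) := by
  unfold gfsStep
  by_cases h1 : (field == "model" || PySem.Str.startswith field "device.") = true
  · rw [if_pos h1, PySem.Dict.getD_modify, if_neg (by decide),
      (show isOtherField field = false by
      have hx : isDeviceField field = true := h1
      simp [isOtherField, hx])]
    simp
  rw [if_neg h1]
  by_cases h2 : PySem.Str.startswith field "battery." = true
  · rw [if_pos h2, PySem.Dict.getD_modify, if_neg (by decide),
      (show isOtherField field = false by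
      have hx : isBatteryField field = true := h2
      simp [isOtherField, hx])]
    simp
  rw [if_neg h2]
  by_cases h3 : PySem.Str.startswith field "input." = true
  · rw [if_pos h3, PySem.Dict.getD_modify, if_neg (by decide),
      (show isOtherField field = false by
      have hx : isInputField field = true := h3
      simp [isOtherField, hx])]
    simp
  rw [if_neg h3]
  by_cases h4 : PySem.Str.startswith field "ups." = true
  · rw [if_pos h4, PySem.Dict.getD_modify, if_neg (by decide),
      (show isOtherField field = false by
      have hx : isUpsField field = true := h4
      simp [isOtherField, hx])]
    simp
  rw [if_neg h4]
  by_cases h5 : PySem.Str.startswith field "output." = true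
  · rw [if_pos h5, PySem.Dict.getD_modify, if_neg (by decide),
      (show isOtherField field = false by
      have hx : isOutputField field = true := h5
      simp [isOtherField, hx])]
    simp
  rw [if_neg h5]
  rw [PySem.Dict.getD_modify, if_pos rfl,
    (show isOtherField field = true by
      simp only [isOtherField, isDeviceField, isBatteryField, isInputField, isUpsField, isOutputField,
        Bool.eq_false_iff.mpr h1, Bool.eq_false_iff.mpr h2, Bool.eq_false_iff.mpr h3,
        Bool.eq_false_iff.mpr h4, Bool.eq_false_iff.mpr h5]
      rfl)]
  simp

-- ===== VERDICT (by name: the statement is the Claim_ definition above) =====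
theorem grouped_field_sections_spec : Claim_equal_grouped_field_sections := by
  intro fields _
  unfold Spec_grouped_field_sections grouped_field_sections grouped_field_sections_alt
  simp only [List.foldl_cons, List.foldl_nil]
  rw [gfsStep_getD "Device" isDeviceField gfsStep_device,
      gfsStep_getD "Battery" isBatteryField gfsStep_battery,
      gfsStep_getD "Input" isInputField gfsStep_input,
      gfsStep_getD "UPS" isUpsField gfsStep_ups,
      gfsStep_getD "Output" isOutputField gfsStep_output,
      gfsStep_getD "Other" isOtherField gfsStep_other]
  simp only [(by decide : (PySem.Dict.ofList
      [("Device", ([] : List String)), ("Battery", []), ("Input", []), ("UPS", []), ("Output", []), ("Other", [])]).getD "Device" [] = []),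
      (by decide : (PySem.Dict.ofList
      [("Device", ([] : List String)), ("Battery", []), ("Input", []), ("UPS", []), ("Output", []), ("Other", [])]).getD "Battery" [] = []),
      (by decide : (PySem.Dict.ofList
      [("Device", ([] : List String)), ("Battery", []), ("Input", []), ("UPS", []), ("Output", []), ("Other", [])]).getD "Input" [] = []),
      (by decide : (PySem.Dict.ofList
      [("Device", ([] : List String)), ("Battery", []), ("Input", []), ("UPS", []), ("Output", []), ("Other", [])]).getD "UPS" [] = []),
      (by decide : (PySem.Dict.ofList
      [("Device", ([] : List String)), ("Battery", []), ("Input", []), ("UPS", []), ("Output", []), ("Other", [])]).getD "Output" [] = []),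
      (by decide : (PySem.Dict.ofList
      [("Device", ([] : List String)), ("Battery", []), ("Input", []), ("UPS", []), ("Output", []), ("Other", [])]).getD "Other" [] = []), List.nil_append]
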